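-- pv_equiv track=rewrite | github.com/Juhyun0313/PythonAlgorithms | Python 공부.py | SortLogs
-- ===== SOURCE A (Python) =====
-- def SortLogs(s : list[str]) -> list[str]:
--     digits = []
--     letters = []
--     for logs in s:
--         if logs.split()[1].isdigit():
--             digits.append(logs)
--         else:
--             letters.append(logs)
--
--     letters.sort(key = lambda x : (x.split()[1], x.split()[0]))
--
--     return letters + digits
-- ===== SOURCE B (Python) =====
-- def SortLogs(s : list[str]) -> list[str]:
--     def key(x):
--         w = x.split()
--         if w[1].isdigit():
--             return (1, [])
--         return (0, [w[1], w[0]])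
--     return sorted(s, key=key)
-- ===== Notes on version B (the rewrite author's own statement) =====
-- stated objective: simpler
-- what changed: Replaces A's partition-into-two-lists + sort-the-letters + concatenate with a single stable sorted() pass over the whole list using a composite (tag, second word, first word) key; stability keeps digit-logs in their original relative order.
import Mathlib
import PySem

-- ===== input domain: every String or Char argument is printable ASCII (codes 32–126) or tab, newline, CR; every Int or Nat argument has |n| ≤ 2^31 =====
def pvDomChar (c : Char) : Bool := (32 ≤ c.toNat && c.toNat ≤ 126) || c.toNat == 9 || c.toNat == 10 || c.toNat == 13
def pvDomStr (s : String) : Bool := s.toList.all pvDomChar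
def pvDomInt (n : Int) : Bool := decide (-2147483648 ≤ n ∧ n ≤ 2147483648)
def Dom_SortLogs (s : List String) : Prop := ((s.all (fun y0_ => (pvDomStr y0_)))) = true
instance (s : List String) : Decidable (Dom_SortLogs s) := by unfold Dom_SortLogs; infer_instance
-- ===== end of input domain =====

-- B replaces A's partition-into-two-lists + sort + concatenation by a single stable sort of the
-- whole list under a composite (tag, [second word, first word]) key: simpler, one pass over s.

-- Shared helpers for the Python expressions x.split()[0], x.split()[1], x.split()[1].isdigit().
-- `getD i ""` is exact for x.split()[i] whenever the split has > i words — guaranteed by Pre_.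
def word0 (x : String) : String := (PySem.Str.split₀ x).getD 0 ""
def word1 (x : String) : String := (PySem.Str.split₀ x).getD 1 ""
def isDigitLog (x : String) : Bool := PySem.Str.strIsdigit (word1 x)

-- ===== PORT A =====
def SortLogs (s : List String) : List String :=
  -- (digits, letters) accumulator; the two appends are the loop body's two branches
  let p := s.foldl (fun (acc : List String × List String) logs =>
      if isDigitLog logs then (acc.1 ++ [logs], acc.2) else (acc.1, acc.2 ++ [logs]))
    ([], [])
  let letters := PySem.List.sorted2 p.2 (fun x => word1 x) (fun x => word0 x)
  letters ++ p.1

-- ===== PORT B =====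
-- Source B's key x ↦ (1, []) / (0, [w[1], w[0]]): the Int tag and the List String component,
-- compared like a Python tuple, are exactly PySem.List.sorted2's two keys (List < is lexicographic).
def SortLogs_alt (s : List String) : List String :=
  PySem.List.sorted2 s
    (fun x => if isDigitLog x then (1 : Int) else 0)
    (fun x => if isDigitLog x then [] else [word1 x, word0 x])

-- ===== PRECONDITION & SPEC =====
-- Pre_ excludes logs with fewer than two whitespace-separated words, on which A (and B)
-- raise IndexError at logs.split()[1].
def Pre_SortLogs (s : List String) : Prop := ∀ x ∈ s, 2 ≤ (PySem.Str.split₀ x).length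
instance (s : List String) : Decidable (Pre_SortLogs s) := by unfold Pre_SortLogs; infer_instance
def pvWitness_SortLogs : List String := ["dig1 8 1 5 1", "let1 art can", "dig2 3 6", "let2 own kit dig"]

def Spec_SortLogs (s : List String) (out : List String) : Prop := out = SortLogs_alt s
instance (s : List String) (out : List String) : Decidable (Spec_SortLogs s out) := by unfold Spec_SortLogs; infer_instance

-- ===== CLAIM (what is proved, stated in full; the proofs are below) =====
def Claim_equal_SortLogs : Prop := ∀ (s : List String), Dom_SortLogs s → Pre_SortLogs s → Spec_SortLogs s (SortLogs s)

-- ===== LEMMAS AND PROOFS =====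

-- the two comparison functions of the ports' insertion sorts (sorted2's `lt`, spelt out)
def beforeA (a b : String) : Bool :=
  decide (word1 a < word1 b) || (!decide (word1 b < word1 a) && decide (word0 a < word0 b))
def bk1 (x : String) : Int := if isDigitLog x then 1 else 0
def bk2 (x : String) : List String := if isDigitLog x then [] else [word1 x, word0 x]
def beforeB (a b : String) : Bool :=
  decide (bk1 a < bk1 b) || (!decide (bk1 b < bk1 a) && decide (bk2 a < bk2 b))

lemma listLex_cons_iff (a b : String) (t u : List String) :
    (a :: t < b :: u) ↔ (a < b ∨ a = b ∧ t < u) := by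
  constructor
  · intro h; cases h with
    | rel h => exact Or.inl h
    | cons h => exact Or.inr ⟨rfl, h⟩
  · rintro (h | ⟨rfl, h⟩)
    · exact List.Lex.rel h
    · exact List.Lex.cons h

lemma bKey_digit_not_lt (x y : String) (hx : isDigitLog x = true) :
    beforeB x y = false := by
  unfold beforeB bk1 bk2
  rw [hx]
  by_cases hy : isDigitLog y = true <;> simp [hy]

lemma bKey_letter_lt_digit (x y : String) (hx : isDigitLog x = false) (hy : isDigitLog y = true) :
    beforeB x y = true := by
  unfold beforeB bk1 bk2
  rw [hx, hy]
  simp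

lemma beforeB_eq_beforeA (x y : String) (hx : isDigitLog x = false) (hy : isDigitLog y = false) :
    beforeB x y = beforeA x y := by
  unfold beforeB beforeA bk1 bk2
  rw [hx, hy]
  have hlex : ([word1 x, word0 x] < [word1 y, word0 y])
      ↔ (word1 x < word1 y ∨ (word1 x = word1 y ∧ word0 x < word0 y)) := by
    rw [listLex_cons_iff, listLex_cons_iff]
    simp
  rcases lt_trichotomy (word1 x) (word1 y) with h | h | h
  · simp [hlex, h]
  · simp [h, listLex_cons_iff]
  · simp [hlex, not_lt_of_gt h, ne_of_gt h, h]

lemma insertBy_append_right {α : Type} (before : α → α → Bool) (x : α) (ys zs : List α)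
    (h : ∀ z ∈ zs, before x z = true) :
    PySem.List.insertBy before x (ys ++ zs) = PySem.List.insertBy before x ys ++ zs := by
  induction ys with
  | nil =>
    cases zs with
    | nil => simp [PySem.List.insertBy]
    | cons z t => simp [PySem.List.insertBy, h z (by simp)]
  | cons y ys ih =>
    by_cases hy : before x y = true <;> simp [PySem.List.insertBy, hy, ih]

lemma insertBy_beforeB_eq_beforeA (x : String) (L : List String)
    (hx : isDigitLog x = false) (hL : ∀ y ∈ L, isDigitLog y = false) :
    PySem.List.insertBy beforeB x L = PySem.List.insertBy beforeA x L := by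
  induction L with
  | nil => rfl
  | cons y t ih =>
    have hy := hL y (by simp)
    have ht : ∀ z ∈ t, isDigitLog z = false := fun z hz => hL z (by simp [hz])
    simp only [PySem.List.insertBy, beforeB_eq_beforeA x y hx hy, ih ht]

-- main invariant: B's insertion-sort fold over the whole list, started on letters ++ digits,
-- equals A's insertion-sort fold over the letter-logs followed by the digit-logs in order
lemma main_inv (s : List String) : ∀ (L D : List String),
    (∀ x ∈ L, isDigitLog x = false) → (∀ x ∈ D, isDigitLog x = true) →
    s.foldl (fun acc x => PySem.List.insertBy beforeB x acc) (L ++ D)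
      = (s.filter (fun x => !isDigitLog x)).foldl (fun acc x => PySem.List.insertBy beforeA x acc) L
        ++ (D ++ s.filter (fun x => isDigitLog x)) := by
  induction s with
  | nil => intro L D _ _; simp
  | cons x s ih =>
    intro L D hL hD
    by_cases hx : isDigitLog x = true
    · have h1 : PySem.List.insertBy beforeB x (L ++ D) = (L ++ D) ++ [x] :=
        PySem.List.insertBy_of_forall_not_before _ _ _
          (fun y _ => bKey_digit_not_lt x y hx)
      have hD' : ∀ z ∈ D ++ [x], isDigitLog z = true := by
        intro z hz; rcases List.mem_append.mp hz with h | h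
        · exact hD z h
        · simp at h; subst h; exact hx
      simp only [List.foldl_cons, h1, List.append_assoc]
      rw [ih L (D ++ [x]) hL hD']
      simp [hx]
    · have hx' : isDigitLog x = false := by simpa using hx
      have h1 : PySem.List.insertBy beforeB x (L ++ D)
          = PySem.List.insertBy beforeB x L ++ D :=
        insertBy_append_right _ _ _ _ (fun z hz => bKey_letter_lt_digit x z hx' (hD z hz))
      have h2 := insertBy_beforeB_eq_beforeA x L hx' hL
      have hL' : ∀ y ∈ PySem.List.insertBy beforeA x L, isDigitLog y = false := by
        intro y hy
        rcases (PySem.List.mem_insertBy _ _ _ _).mp hy with h | h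
        · subst h; exact hx'
        · exact hL y h
      simp only [List.foldl_cons, h1, h2]
      rw [ih (PySem.List.insertBy beforeA x L) D hL' hD]
      simp [hx']

-- A's partition loop is the pair of filters
lemma partition_eq (s : List String) : ∀ (dacc lacc : List String),
    s.foldl (fun (acc : List String × List String) logs =>
        if isDigitLog logs then (acc.1 ++ [logs], acc.2) else (acc.1, acc.2 ++ [logs]))
      (dacc, lacc)
      = (dacc ++ s.filter (fun x => isDigitLog x), lacc ++ s.filter (fun x => !isDigitLog x)) := by
  induction s with
  | nil => intro d l; simp
  | cons x s ih =>
    intro d l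
    by_cases hx : isDigitLog x = true <;>
      simp [hx, ih]

-- ===== VERDICT (by name: the statement is the Claim_ definition above) =====
theorem SortLogs_spec : Claim_equal_SortLogs := by
  intro s _ _
  unfold Spec_SortLogs SortLogs
  rw [partition_eq s [] []]
  simp only [List.nil_append]
  have hmain := main_inv s [] [] (by simp) (by simp)
  simp only [List.nil_append] at hmain
  have hB : SortLogs_alt s = List.foldl (fun acc x => PySem.List.insertBy beforeB x acc) [] s := rfl
  rw [hB, hmain]
  rfl
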